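-- pv_equiv track=rewrite | github.com/hilmican/hm | app/services/ai_utils.py | _lookup_matrix_size
-- ===== SOURCE A (Python) =====
-- from typing import Dict, List, Optional, Any
--
-- def _closest_height_row(matrix: Dict[int, List[tuple[int, str]]], height_cm: int) -> Optional[int]:
-- 	if not matrix:
-- 		return None
-- 	return min(matrix.keys(), key=lambda h: abs(h - height_cm))
--
-- def _lookup_matrix_size(
-- 	matrix: Dict[int, List[tuple[int, str]]],
-- 	height_cm: int,
-- 	weight_kg: int,
-- ) -> Optional[str]:
-- 	if not (height_cm and weight_kg):
-- 		return None
-- 	row_height = _closest_height_row(matrix, height_cm)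
-- 	if row_height is None:
-- 		return None
-- 	columns = sorted(matrix.get(row_height, []), key=lambda entry: entry[0])
-- 	if not columns:
-- 		return None
-- 	for max_weight, size in columns:
-- 		if weight_kg <= max_weight:
-- 			return size
-- 	return None
-- ===== SOURCE B (Python) =====
-- def _closest_height_row(matrix, height_cm):
--     if not matrix:
--         return None
--     return min(matrix.keys(), key=lambda h: abs(h - height_cm))
--
--
-- def _lookup_matrix_size(matrix, height_cm, weight_kg):
--     if not (height_cm and weight_kg):
--         return None
--     row_height = _closest_height_row(matrix, height_cm)
--     if row_height is None:
--         return None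
--     candidates = [(mw, s) for (mw, s) in matrix.get(row_height, []) if weight_kg <= mw]
--     if not candidates:
--         return None
--     return min(candidates, key=lambda e: e[0])[1]
-- ===== Notes on version B (the rewrite author's own statement) =====
-- stated objective: simpler
-- what changed: Replaces the sort of the whole row followed by a first-match scan with a single filter of admissible columns and min by max_weight (min returns the first minimal element, matching the stable sort's tie-breaking).
import Mathlib
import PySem

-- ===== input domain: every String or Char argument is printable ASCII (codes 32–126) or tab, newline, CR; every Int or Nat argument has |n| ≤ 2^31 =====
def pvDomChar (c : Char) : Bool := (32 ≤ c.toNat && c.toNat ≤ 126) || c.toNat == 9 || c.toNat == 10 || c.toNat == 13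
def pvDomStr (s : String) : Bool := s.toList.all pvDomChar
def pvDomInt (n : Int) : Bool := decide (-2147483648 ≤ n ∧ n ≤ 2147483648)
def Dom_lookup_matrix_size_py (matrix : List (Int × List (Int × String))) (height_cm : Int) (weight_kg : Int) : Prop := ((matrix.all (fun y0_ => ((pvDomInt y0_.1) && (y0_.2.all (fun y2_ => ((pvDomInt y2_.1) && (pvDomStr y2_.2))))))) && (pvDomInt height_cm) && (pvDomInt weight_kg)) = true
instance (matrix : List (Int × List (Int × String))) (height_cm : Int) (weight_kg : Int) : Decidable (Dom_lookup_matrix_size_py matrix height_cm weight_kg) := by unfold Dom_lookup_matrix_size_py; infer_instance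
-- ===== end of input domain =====

-- B replaces A's sort-whole-row-then-first-match scan by one filter of admissible
-- columns plus a first-minimal selection (simpler; same return value everywhere).

-- ===== PORT A =====
-- shared helper: both Pythons contain the identical _closest_height_row
def closest_height_row (d : PySem.Dict Int (List (Int × String))) (height_cm : Int) : Option Int :=
  if d.items = [] then none
  else PySem.List.min? d.keys (fun h => |h - height_cm|)

-- A's 'for max_weight, size in columns: if weight_kg <= max_weight: return size'
def lookupLoopA (weight_kg : Int) : List (Int × String) → Option String
  | [] => none
  | (mw, s) :: rest => if weight_kg ≤ mw then some s else lookupLoopA weight_kg rest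

def lookup_matrix_size_py (matrix : List (Int × List (Int × String))) (height_cm : Int) (weight_kg : Int) : Option String :=
  if height_cm == 0 || weight_kg == 0 then none
  else
    match closest_height_row (PySem.Dict.ofList matrix) height_cm with
    | none => none
    | some row_height =>
      let columns := PySem.List.sorted ((PySem.Dict.ofList matrix).getD row_height []) (fun e => e.1) false
      if columns = [] then none
      else lookupLoopA weight_kg columns

-- ===== PORT B =====
def lookup_matrix_size_py_alt (matrix : List (Int × List (Int × String))) (height_cm : Int) (weight_kg : Int) : Option String :=
  if height_cm == 0 || weight_kg == 0 then none
  else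
    match closest_height_row (PySem.Dict.ofList matrix) height_cm with
    | none => none
    | some row_height =>
      let candidates := ((PySem.Dict.ofList matrix).getD row_height []).filter (fun e => decide (weight_kg ≤ e.1))
      if candidates = [] then none
      else (PySem.List.min? candidates (fun e => e.1)).map (fun e => e.2)

-- ===== PRECONDITION & SPEC =====
def Spec_lookup_matrix_size_py (matrix : List (Int × List (Int × String))) (height_cm : Int) (weight_kg : Int) (out : Option String) : Prop := out = lookup_matrix_size_py_alt matrix height_cm weight_kg
instance (matrix : List (Int × List (Int × String))) (height_cm : Int) (weight_kg : Int) (out : Option String) : Decidable (Spec_lookup_matrix_size_py matrix height_cm weight_kg out) := by unfold Spec_lookup_matrix_size_py; infer_instance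

-- ===== CLAIM (what is proved, stated in full; the proofs are below) =====
def Claim_equal_lookup_matrix_size_py : Prop := ∀ (matrix : List (Int × List (Int × String))) (height_cm : Int) (weight_kg : Int), Dom_lookup_matrix_size_py matrix height_cm weight_kg → Spec_lookup_matrix_size_py matrix height_cm weight_kg (lookup_matrix_size_py matrix height_cm weight_kg)

-- ===== LEMMAS AND PROOFS =====

-- A's scan is find? of the admissibility predicate, mapped to the size
theorem lookupLoopA_eq_find? (w : Int) (cols : List (Int × String)) :
    lookupLoopA w cols = (cols.find? (fun e => decide (w ≤ e.1))).map (fun e => e.2) := by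
  induction cols with
  | nil => rfl
  | cons c rest ih =>
    obtain ⟨mw, s⟩ := c
    by_cases h : w ≤ mw <;> simp [lookupLoopA, List.find?, h, ih]

-- find? through an insertion step into a key-sorted list
theorem find?_insertBy {α : Type} (key : α → Int) (p : α → Bool) (x : α) (l : List α)
    (hl : l.Pairwise (fun a b => key a ≤ key b)) :
    List.find? p (PySem.List.insertBy (fun a b => decide (key a < key b)) x l) =
      match List.find? p l with
      | none => if p x then some x else none
      | some m => if p x && decide (key x < key m) then some x else some m := by
  induction l with
  | nil =>
    by_cases hp : p x <;> simp [PySem.List.insertBy, List.find?, hp]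
  | cons y ys ih =>
    have hy : ∀ b ∈ ys, key y ≤ key b := fun b hb => List.rel_of_pairwise_cons hl hb
    by_cases hk : key x < key y
    · simp only [PySem.List.insertBy, hk, decide_true, if_true]
      rcases hfind : List.find? p (y :: ys) with _ | m
      · by_cases hp : p x
        · rw [List.find?_cons_of_pos hp]; simp [hp]
        · rw [List.find?_cons_of_neg hp, hfind]; simp [hp]
      · have hm : m ∈ y :: ys := List.mem_of_find?_eq_some hfind
        have hxm : key x < key m := by
          rcases List.mem_cons.mp hm with h | h
          · exact h ▸ hk
          · exact lt_of_lt_of_le hk (hy m h)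
        by_cases hp : p x
        · rw [List.find?_cons_of_pos hp]; simp [hp, hxm]
        · rw [List.find?_cons_of_neg hp, hfind]; simp [hp]
    · simp only [PySem.List.insertBy, hk, decide_false, Bool.false_eq_true, if_false]
      by_cases hpy : p y
      · rw [List.find?_cons_of_pos hpy, List.find?_cons_of_pos hpy]
        simp [hk]
      · rw [List.find?_cons_of_neg hpy, List.find?_cons_of_neg hpy,
          ih (List.pairwise_cons.mp hl).2]

-- min? over an appended element is one fold step
theorem min?_append_singleton {α : Type} (key : α → Int) (l : List α) (x : α) :
    PySem.List.min? (l ++ [x]) key =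
      match PySem.List.min? l key with
      | none => some x
      | some m => if key x < key m then some x else some m := by
  unfold PySem.List.min?
  rw [List.foldl_append]
  rfl

-- the core equivalence: first match in the stable-sorted row = first minimal of the filtered row
theorem find?_sorted_eq_min?_filter (w : Int) (cols : List (Int × String)) :
    List.find? (fun e => decide (w ≤ e.1)) (PySem.List.sorted cols (fun e => e.1) false) =
      PySem.List.min? (cols.filter (fun e => decide (w ≤ e.1))) (fun e => e.1) := by
  induction cols using List.reverseRecOn with
  | nil => rfl
  | append_singleton cols x ih =>
    have hsorted : PySem.List.sorted (cols ++ [x]) (fun e => e.1) false =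
        PySem.List.insertBy (fun a b => decide (a.1 < b.1)) x
          (PySem.List.sorted cols (fun e => e.1) false) := by
      rw [PySem.List.sorted_eq_foldl_insertBy, List.foldl_append,
        ← PySem.List.sorted_eq_foldl_insertBy]
      rfl
    have hpair : (PySem.List.sorted cols (fun e : Int × String => e.1) false).Pairwise
        (fun a b => a.1 ≤ b.1) := PySem.List.sorted_pairwise cols (fun e => e.1)
    rw [hsorted, find?_insertBy (fun e => e.1) _ x _ hpair, ih, List.filter_append]
    by_cases hp : w ≤ x.1
    · simp only [List.filter, hp, decide_true]
      rw [min?_append_singleton]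
      rcases PySem.List.min? (cols.filter fun e => decide (w ≤ e.1)) (fun e => e.1) with _ | m <;>
        simp
    · simp only [List.filter, hp, decide_false]
      rcases hmin : PySem.List.min? (cols.filter fun e => decide (w ≤ e.1)) (fun e => e.1)
          with _ | m <;> rw [hmin] <;> simp [hmin]

-- B's tail: guarded min?-map equals the unguarded one (min? is none on [])
theorem min?_map_guard (w : Int) (cols : List (Int × String)) :
    (if cols.filter (fun e => decide (w ≤ e.1)) = [] then none
     else (PySem.List.min? (cols.filter (fun e => decide (w ≤ e.1))) (fun e => e.1)).map (fun e => e.2)) =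
      (PySem.List.min? (cols.filter (fun e => decide (w ≤ e.1))) (fun e => e.1)).map (fun e => e.2) := by
  by_cases h : cols.filter (fun e => decide (w ≤ e.1)) = [] <;> simp [h, PySem.List.min?]

-- A's tail: the emptiness guard on the sorted row is redundant for the loop
theorem loop_guard (w : Int) (cols : List (Int × String)) :
    (if PySem.List.sorted cols (fun e => e.1) false = [] then none
     else lookupLoopA w (PySem.List.sorted cols (fun e => e.1) false)) =
      lookupLoopA w (PySem.List.sorted cols (fun e => e.1) false) := by
  by_cases h : PySem.List.sorted cols (fun e => e.1) false = [] <;> simp [h, lookupLoopA]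

-- ===== VERDICT (by name: the statement is the Claim_ definition above) =====
theorem lookup_matrix_size_py_spec : Claim_equal_lookup_matrix_size_py := by
  intro matrix height_cm weight_kg _
  unfold Spec_lookup_matrix_size_py lookup_matrix_size_py lookup_matrix_size_py_alt
  by_cases hz : height_cm == 0 || weight_kg == 0
  · simp [hz]
  · simp only [hz, Bool.false_eq_true, if_false]
    rcases closest_height_row (PySem.Dict.ofList matrix) height_cm with _ | rh
    · rfl
    · simp only
      rw [loop_guard, min?_map_guard, lookupLoopA_eq_find?, find?_sorted_eq_min?_filter]
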